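-- pv_equiv track=rewrite | github.com/vasylkhorev/fuzzy-life | verify_halflife_patterns.py | parse_rle_to_dict
-- ===== SOURCE A (Python) =====
-- def parse_rle_to_dict(rle_str):
--     lines = rle_str.strip().split('\n')
--     body = ""
--     for line in lines:
--         if line.startswith('#'): continue
--         if '=' in line: continue
--         body += line.strip()
--
--     body = body.replace('!', '')
--     rows = body.split('$')
--
--     grid = {}
--     for r, row_str in enumerate(rows):
--         c = 0
--         count = ""
--         for char in row_str:
--             if char.isdigit():
--                 count += char
--             else:
--                 num = int(count) if count else 1
--                 if char == 'A':
--                     for i in range(num): grid[(r, c + i)] = 1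
--                 elif char == 'B':
--                     for i in range(num): grid[(r, c + i)] = 2
--                 c += num
--                 count = ""
--     return grid
-- ===== SOURCE B (Python) =====
-- def _tokens(row):
--     # (count, tag) pairs: a maximal digit run followed by one non-digit;
--     # a trailing bare digit run (no tag after it) is dropped.
--     toks = []
--     i, n = 0, len(row)
--     while i < n:
--         j = i
--         while j < n and row[j].isdigit():
--             j += 1
--         if j == n:
--             break
--         toks.append((row[i:j], row[j]))
--         i = j + 1
--     return toks
--
--
-- def parse_rle_to_dict(rle_str):
--     kept = [ln.strip() for ln in rle_str.strip().split('\n')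
--             if not ln.startswith('#') and '=' not in ln]
--     body = ''.join(kept).replace('!', '')
--     grid = {}
--     for r, row in enumerate(body.split('$')):
--         c = 0
--         for count, tag in _tokens(row):
--             num = int(count) if count else 1
--             if tag == 'A' or tag == 'B':
--                 v = 1 if tag == 'A' else 2
--                 for i in range(num):
--                     grid[(r, c + i)] = v
--             c += num
--     return grid
-- ===== Notes on version B (the rewrite author's own statement) =====
-- stated objective: alternative
-- what changed: B first tokenizes each row into (count, tag) pairs (maximal digit run + one non-digit, dropping trailing bare digits) and then folds over tokens, replacing A's per-character state machine with its count accumulator; the body is built by a filtered comprehension + join instead of A's string-accumulator loop.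
import Mathlib
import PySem

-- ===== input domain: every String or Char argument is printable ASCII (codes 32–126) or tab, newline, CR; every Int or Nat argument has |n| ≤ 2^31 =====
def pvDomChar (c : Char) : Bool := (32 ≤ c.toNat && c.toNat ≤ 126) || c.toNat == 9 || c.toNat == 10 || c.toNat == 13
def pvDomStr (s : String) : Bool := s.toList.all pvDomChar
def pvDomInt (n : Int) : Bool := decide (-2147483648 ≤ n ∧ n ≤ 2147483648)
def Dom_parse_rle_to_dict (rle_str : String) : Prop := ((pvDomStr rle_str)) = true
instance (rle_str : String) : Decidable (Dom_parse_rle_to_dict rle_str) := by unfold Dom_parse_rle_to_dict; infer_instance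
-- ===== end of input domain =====

-- B tokenizes each row into (count, tag) pairs and folds over tokens instead of A's
-- per-character state machine; same return value, no speed claim.

-- ===== PORT A =====
-- A's inner per-character loop body: state is (grid, c, count).
-- count is a (possibly empty) string of digit characters; 'int(count) if count else 1'
-- never raises because count is all digits, so ofChars?'s getD default is never used.
def pvStepA (r : Int) (st : PySem.Dict (Int × Int) Int × Int × List Char) (ch : Char) :
    PySem.Dict (Int × Int) Int × Int × List Char :=
  if PySem.Chars.isdigit ch then (st.1, st.2.1, st.2.2 ++ [ch])
  else
    let num : Int := if st.2.2 = [] then 1 else (PySem.Int.ofChars? st.2.2).getD 0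
    let g :=
      if ch = 'A' then
        (PySem.List.pyRange 0 num 1).foldl (fun g i => g.insert (r, st.2.1 + i) 1) st.1
      else if ch = 'B' then
        (PySem.List.pyRange 0 num 1).foldl (fun g i => g.insert (r, st.2.1 + i) 2) st.1
      else st.1
    (g, st.2.1 + num, [])

def parse_rle_to_dict (rle_str : String) : List (Int × Int × Int) :=
  let lines := PySem.Chars.splitOn (PySem.Chars.strip rle_str.toList) ['\n']
  let body := lines.foldl
    (fun acc line =>
      if PySem.Chars.startswith line ['#'] then acc
      else if PySem.Chars.isIn ['='] line then acc
      else acc ++ PySem.Chars.strip line) ([] : List Char)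
  let body2 := PySem.Chars.replace body ['!'] []
  let rows := PySem.Chars.splitOn body2 ['$']
  let grid := (PySem.List.enumerate rows 0).foldl
    (fun g p => (p.2.foldl (pvStepA p.1) (g, 0, ([] : List Char))).1)
    (PySem.Dict.empty : PySem.Dict (Int × Int) Int)
  grid.items.map (fun kv => (kv.1.1, kv.1.2, kv.2))

-- ===== PORT B =====
-- B's tokenizer _tokens: maximal digit run (inner while ↔ takeWhile/dropWhile) plus the
-- following non-digit; a trailing bare digit run is dropped (the 'if j == n: break').
def pvToks (row : List Char) : List (List Char × Char) :=
  match h : row.dropWhile PySem.Chars.isdigit with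
  | [] => []
  | tag :: rest => (row.takeWhile PySem.Chars.isdigit, tag) :: pvToks rest
termination_by row.length
decreasing_by
  have h1 : (row.dropWhile PySem.Chars.isdigit).length ≤ row.length :=
    List.length_dropWhile_le _ _
  rw [h] at h1; simp at h1; omega

-- B's per-token step: state is (grid, c).
def pvDoTok (r : Int) (s : PySem.Dict (Int × Int) Int × Int) (tok : List Char × Char) :
    PySem.Dict (Int × Int) Int × Int :=
  let num : Int := if tok.1 = [] then 1 else (PySem.Int.ofChars? tok.1).getD 0
  if tok.2 = 'A' ∨ tok.2 = 'B' then
    let v : Int := if tok.2 = 'A' then 1 else 2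
    ((PySem.List.pyRange 0 num 1).foldl (fun g i => g.insert (r, s.2 + i) v) s.1, s.2 + num)
  else (s.1, s.2 + num)

-- B's 'for r, row in enumerate(...)' loop as structural recursion carrying r.
def pvRows (r : Int) (g : PySem.Dict (Int × Int) Int) :
    List (List Char) → PySem.Dict (Int × Int) Int
  | [] => g
  | row :: rest => pvRows (r + 1) ((pvToks row).foldl (pvDoTok r) (g, 0)).1 rest

def parse_rle_to_dict_alt (rle_str : String) : List (Int × Int × Int) :=
  let kept := (PySem.Chars.splitOn (PySem.Chars.strip rle_str.toList) ['\n']).filter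
    (fun ln => !PySem.Chars.startswith ln ['#'] && !PySem.Chars.isIn ['='] ln)
  -- ''.join(list of strings) is concatenation: List.flatten (exact)
  let body := PySem.Chars.replace ((kept.map PySem.Chars.strip).flatten) ['!'] []
  let grid := pvRows 0 PySem.Dict.empty (PySem.Chars.splitOn body ['$'])
  grid.items.map (fun kv => (kv.1.1, kv.1.2, kv.2))

-- ===== PRECONDITION & SPEC =====
def Spec_parse_rle_to_dict (rle_str : String) (out : List (Int × Int × Int)) : Prop := out = parse_rle_to_dict_alt rle_str
instance (rle_str : String) (out : List (Int × Int × Int)) : Decidable (Spec_parse_rle_to_dict rle_str out) := by unfold Spec_parse_rle_to_dict; infer_instance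

-- ===== CLAIM (what is proved, stated in full; the proofs are below) =====
def Claim_equal_parse_rle_to_dict : Prop := ∀ (rle_str : String), Dom_parse_rle_to_dict rle_str → Spec_parse_rle_to_dict rle_str (parse_rle_to_dict rle_str)

-- ===== LEMMAS AND PROOFS =====

theorem pvToks_eq_nil (row : List Char) (h : row.dropWhile PySem.Chars.isdigit = []) :
    pvToks row = [] := by
  rw [pvToks]; split
  · rfl
  · next h' => rw [h] at h'; exact absurd h' (by simp)

theorem pvToks_eq_cons (row : List Char) (tag : Char) (rest : List Char)
    (h : row.dropWhile PySem.Chars.isdigit = tag :: rest) :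
    pvToks row = (row.takeWhile PySem.Chars.isdigit, tag) :: pvToks rest := by
  rw [pvToks]; split
  · next h' => rw [h] at h'; exact absurd h' (by simp)
  · next t r h' => rw [h] at h'; cases h'; rfl

theorem pvDropDigits (count l : List Char) (hd : count.all PySem.Chars.isdigit = true) :
    (count ++ l).dropWhile PySem.Chars.isdigit = l.dropWhile PySem.Chars.isdigit := by
  induction count with
  | nil => rfl
  | cons a t ih =>
    simp only [List.all_cons, Bool.and_eq_true] at hd
    simp [hd.1, ih hd.2]

theorem pvTakeDigits (count l : List Char) (hd : count.all PySem.Chars.isdigit = true) :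
    (count ++ l).takeWhile PySem.Chars.isdigit = count ++ l.takeWhile PySem.Chars.isdigit := by
  induction count with
  | nil => rfl
  | cons a t ih =>
    simp only [List.all_cons, Bool.and_eq_true] at hd
    simp [hd.1, ih hd.2]

-- the per-row bridge: A's char scan with pending digit run 'count' equals
-- B's token fold over the tokens of count ++ row
theorem pvRow (r : Int) (row : List Char) :
    ∀ (g : PySem.Dict (Int × Int) Int) (c : Int) (count : List Char),
      count.all PySem.Chars.isdigit = true →
      (row.foldl (pvStepA r) (g, c, count)).1
        = ((pvToks (count ++ row)).foldl (pvDoTok r) (g, c)).1 := by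
  induction row with
  | nil =>
    intro g c count hd
    rw [pvToks_eq_nil _ (by simpa using pvDropDigits count [] hd)]
    rfl
  | cons ch t ih =>
    intro g c count hd
    by_cases hch : PySem.Chars.isdigit ch = true
    · rw [List.foldl_cons]
      have hs : pvStepA r (g, c, count) ch = (g, c, count ++ [ch]) := by
        simp [pvStepA, hch]
      rw [hs, ih g c (count ++ [ch]) (by simp [hd, hch]),
        show count ++ ch :: t = (count ++ [ch]) ++ t by simp]
    · have hdrop : (count ++ ch :: t).dropWhile PySem.Chars.isdigit = ch :: t := by
        rw [pvDropDigits count _ hd]; simp [List.dropWhile, hch]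
      have htake : (count ++ ch :: t).takeWhile PySem.Chars.isdigit = count := by
        rw [pvTakeDigits count _ hd]; simp [List.takeWhile, hch]
      rw [pvToks_eq_cons _ ch t hdrop, htake]
      have hkey : ∃ d, pvStepA r (g, c, count) ch
            = (d, c + (if count = [] then (1 : Int) else (PySem.Int.ofChars? count).getD 0), [])
          ∧ pvDoTok r (g, c) (count, ch)
            = (d, c + (if count = [] then (1 : Int) else (PySem.Int.ofChars? count).getD 0)) := by
        by_cases hA : ch = 'A'
        · subst hA
          exact ⟨(PySem.List.pyRange 0
              (if count = [] then (1 : Int) else (PySem.Int.ofChars? count).getD 0) 1).foldl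
                (fun g i => g.insert (r, c + i) 1) g,
            by simp [pvStepA, hch], by simp [pvDoTok]⟩
        · by_cases hB : ch = 'B'
          · subst hB
            exact ⟨(PySem.List.pyRange 0
                (if count = [] then (1 : Int) else (PySem.Int.ofChars? count).getD 0) 1).foldl
                  (fun g i => g.insert (r, c + i) 2) g,
              by simp [pvStepA, hch], by simp [pvDoTok]⟩
          · exact ⟨g, by simp [pvStepA, hch, hA, hB], by simp [pvDoTok, hA, hB]⟩
      obtain ⟨d, h1, h2⟩ := hkey
      rw [List.foldl_cons, List.foldl_cons, h1, h2]
      simpa using ih d _ [] rfl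

-- the outer loop bridge: A's enumerate fold equals B's row recursion
theorem pvOuter (rows : List (List Char)) :
    ∀ (r : Int) (g : PySem.Dict (Int × Int) Int),
      (PySem.List.enumerate rows r).foldl
        (fun g p => (p.2.foldl (pvStepA p.1) (g, 0, ([] : List Char))).1) g
      = pvRows r g rows := by
  induction rows with
  | nil => intro r g; simp [pvRows, PySem.List.enumerate_nil]
  | cons row rest ih =>
    intro r g
    rw [PySem.List.enumerate_cons, List.foldl_cons, ih]
    simp only [pvRows]
    rw [pvRow r row g 0 [] rfl]
    rfl

-- A's body accumulator loop equals B's filter-map-flatten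
theorem pvBody_eq (lines : List (List Char)) :
    lines.foldl
      (fun acc line =>
        if PySem.Chars.startswith line ['#'] then acc
        else if PySem.Chars.isIn ['='] line then acc
        else acc ++ PySem.Chars.strip line) ([] : List Char)
    = ((lines.filter (fun ln =>
        !PySem.Chars.startswith ln ['#'] && !PySem.Chars.isIn ['='] ln)).map
          PySem.Chars.strip).flatten := by
  have aux : ∀ (ls : List (List Char)) (acc : List Char),
      ls.foldl
        (fun acc line =>
          if PySem.Chars.startswith line ['#'] then acc
          else if PySem.Chars.isIn ['='] line then acc
          else acc ++ PySem.Chars.strip line) acc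
      = acc ++ ((ls.filter (fun ln =>
          !PySem.Chars.startswith ln ['#'] && !PySem.Chars.isIn ['='] ln)).map
            PySem.Chars.strip).flatten := by
    intro ls
    induction ls with
    | nil => intro acc; simp
    | cons l t ih =>
      intro acc
      by_cases h1 : PySem.Chars.startswith l ['#'] <;>
        by_cases h2 : PySem.Chars.isIn ['='] l <;>
          simp [h1, h2, ih]
  simpa using aux lines []

-- ===== VERDICT (by name: the statement is the Claim_ definition above) =====
theorem parse_rle_to_dict_spec : Claim_equal_parse_rle_to_dict := by
  intro rle_str _
  unfold Spec_parse_rle_to_dict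
  simp only [parse_rle_to_dict, parse_rle_to_dict_alt]
  rw [pvBody_eq, pvOuter]
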